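-- pv_equiv track=rewrite | github.com/kaluginpeter/Algorithms_and_structures_tasks | Python_Solutions/CodeWars/6kyu/Split_all_even_numbers_to_odd_ones_in_different_ways.py | split_all_even_numbers
-- ===== SOURCE A (Python) =====
-- def split_all_even_numbers(numbers, way):
--     ans: list = list()
--     if way == 0:
--         for i in numbers:
--             if i % 2 == 0:
--                 if i // 2 % 2 != 0:
--                     ans.append(i//2)
--                     ans.append(i//2)
--                 else:
--                     ans.append(i // 2 - 1)
--                     ans.append(i // 2 + 1)
--             else:
--                 ans.append(i)
--         return ans
--     if way == 1:
--         for i in numbers: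
--             if i % 2 == 0:
--                 ans.append(1)
--                 ans.append(i - 1)
--             else:
--                 ans.append(i)
--         return ans
--     if way == 2:
--         for i in numbers:
--             if i % 2 == 0:
--                 for j in range(i // 2 + 1, 0, -1):
--                     if j % 2 != 0 and j * (i // j) == i:
--                         ans.extend([j] * (i // j))
--                         break
--             else:
--                 ans.append(i)
--         return ans
--     else:
--         for i in numbers:
--             if i % 2 == 0:
--                 ans.extend([1] * i)
--             else:
--                 ans.append(i)
--         return ans
-- ===== SOURCE B (Python) =====
-- def split_one(i, way):
--     if i % 2 != 0:
--         return [i]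
--     if way == 0:
--         half = i // 2
--         return [half, half] if half % 2 != 0 else [half - 1, half + 1]
--     if way == 1:
--         return [1, i - 1]
--     if way == 2:
--         if i <= 0:
--             # A's divisor scan range(i//2+1, 0, -1) is empty (or finds j=1 with
--             # i//j == 0 at i == 0), so non-positive evens contribute nothing.
--             return []
--         m = i
--         while m % 2 == 0:
--             m //= 2
--         return [m] * (i // m)
--     return [1] * i
--
--
-- def split_all_even_numbers(numbers, way):
--     out = []
--     for i in numbers:
--         out.extend(split_one(i, way))
--     return out
-- ===== Notes on version B (the rewrite author's own statement) =====
-- stated objective: alternative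
-- what changed: Replaced A's four separate accumulator loops (and, for way 2, the downward scan over all candidate divisors) by a single flatMap over a per-element splitter that strips factors of 2 to obtain the largest odd divisor directly; the scan is avoided, but the output size itself dominates the cost, so overall speed is similar.
import Mathlib
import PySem

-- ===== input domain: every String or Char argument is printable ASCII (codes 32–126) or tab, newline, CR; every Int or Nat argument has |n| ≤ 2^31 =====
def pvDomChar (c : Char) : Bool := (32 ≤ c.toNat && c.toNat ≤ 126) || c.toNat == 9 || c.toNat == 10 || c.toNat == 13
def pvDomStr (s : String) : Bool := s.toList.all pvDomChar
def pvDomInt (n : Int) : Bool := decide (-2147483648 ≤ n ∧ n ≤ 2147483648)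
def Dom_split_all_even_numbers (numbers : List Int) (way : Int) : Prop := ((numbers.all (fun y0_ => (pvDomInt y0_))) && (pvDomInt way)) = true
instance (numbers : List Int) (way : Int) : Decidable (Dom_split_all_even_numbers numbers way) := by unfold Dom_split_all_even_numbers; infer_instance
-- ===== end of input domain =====

-- B replaces A's four accumulator loops and the divisor scan of way 2 by one
-- flatMap over a per-element splitter that strips factors of 2 (alternative algorithm).

-- ===== PORT A =====
-- inner 'for j in range(i//2+1, 0, -1): if …: ans.extend([j]*(i//j)); break'
def pvScanA (i : Int) : List Int → List Int
  | [] => []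
  | j :: rest =>
    if PySem.Int.mod j 2 ≠ 0 ∧ j * PySem.Int.floordiv i j = i then
      List.replicate (PySem.Int.floordiv i j).toNat j
    else pvScanA i rest

def split_all_even_numbers (numbers : List Int) (way : Int) : List Int :=
  if way = 0 then
    numbers.foldl (fun ans i =>
      if PySem.Int.mod i 2 = 0 then
        if PySem.Int.mod (PySem.Int.floordiv i 2) 2 ≠ 0 then
          ans ++ [PySem.Int.floordiv i 2] ++ [PySem.Int.floordiv i 2]
        else
          ans ++ [PySem.Int.floordiv i 2 - 1] ++ [PySem.Int.floordiv i 2 + 1]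
      else ans ++ [i]) []
  else if way = 1 then
    numbers.foldl (fun ans i =>
      if PySem.Int.mod i 2 = 0 then ans ++ [1] ++ [i - 1] else ans ++ [i]) []
  else if way = 2 then
    numbers.foldl (fun ans i =>
      if PySem.Int.mod i 2 = 0 then
        ans ++ pvScanA i (PySem.List.pyRange (PySem.Int.floordiv i 2 + 1) 0 (-1))
      else ans ++ [i]) []
  else
    numbers.foldl (fun ans i =>
      if PySem.Int.mod i 2 = 0 then ans ++ List.replicate i.toNat 1 else ans ++ [i]) []

-- ===== PORT B =====
-- 'while m % 2 == 0: m //= 2' (the m ≠ 0 guard only makes the recursion total;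
-- B only calls it with m > 0, where the Python loop terminates likewise)
def pvOddPart (m : Int) : Int :=
  if h : m ≠ 0 ∧ PySem.Int.mod m 2 = 0 then pvOddPart (PySem.Int.floordiv m 2)
  else m
termination_by m.natAbs
decreasing_by
  rw [PySem.Int.floordiv_eq_ediv_of_pos (by norm_num : (0:Int) < 2)]
  rw [PySem.Int.mod_eq_emod_of_pos (by norm_num : (0:Int) < 2)] at h
  omega

def pvSplitOne (i way : Int) : List Int :=
  if PySem.Int.mod i 2 ≠ 0 then [i]
  else if way = 0 then
    if PySem.Int.mod (PySem.Int.floordiv i 2) 2 ≠ 0 then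
      [PySem.Int.floordiv i 2, PySem.Int.floordiv i 2]
    else [PySem.Int.floordiv i 2 - 1, PySem.Int.floordiv i 2 + 1]
  else if way = 1 then [1, i - 1]
  else if way = 2 then
    if i ≤ 0 then []
    else
      let m := pvOddPart i
      List.replicate (PySem.Int.floordiv i m).toNat m
  else List.replicate i.toNat 1

def split_all_even_numbers_alt (numbers : List Int) (way : Int) : List Int :=
  numbers.foldl (fun out i => out ++ pvSplitOne i way) []

-- ===== PRECONDITION & SPEC =====
def Spec_split_all_even_numbers (numbers : List Int) (way : Int) (out : List Int) : Prop := out = split_all_even_numbers_alt numbers way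
instance (numbers : List Int) (way : Int) (out : List Int) : Decidable (Spec_split_all_even_numbers numbers way out) := by unfold Spec_split_all_even_numbers; infer_instance

-- ===== CLAIM (what is proved, stated in full; the proofs are below) =====
def Claim_equal_split_all_even_numbers : Prop := ∀ (numbers : List Int) (way : Int), Dom_split_all_even_numbers numbers way → Spec_split_all_even_numbers numbers way (split_all_even_numbers numbers way)

-- ===== LEMMAS AND PROOFS =====

-- pvOddPart m, for m > 0: positive, odd, divides m, and is divided by every odd divisor of m
theorem pvOddPart_props (m : Int) (hm : 0 < m) :
    0 < pvOddPart m ∧ pvOddPart m % 2 = 1 ∧ pvOddPart m ∣ m ∧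
      ∀ j : Int, j % 2 = 1 → j ∣ m → j ∣ pvOddPart m := by
  induction m using pvOddPart.induct with
  | case1 m h ih =>
    obtain ⟨hne, hev0⟩ := h
    have hev : m % 2 = 0 := by
      rwa [PySem.Int.mod_eq_emod_of_pos (by norm_num : (0:Int) < 2)] at hev0
    have hfd : PySem.Int.floordiv m 2 = m / 2 :=
      PySem.Int.floordiv_eq_ediv_of_pos (by norm_num : (0:Int) < 2)
    have hrec : pvOddPart m = pvOddPart (m / 2) := by
      rw [pvOddPart, dif_pos ⟨hne, hev0⟩, hfd]
    rw [hfd] at ih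
    obtain ⟨hpos, hodd, hdvd, hmax⟩ := ih (by omega : 0 < m / 2)
    rw [hrec]
    refine ⟨hpos, hodd, hdvd.trans ⟨2, by omega⟩, ?_⟩
    intro j hj hjm
    apply hmax j hj
    have hcop : IsCoprime j (2 : Int) := by
      rw [Int.isCoprime_iff_gcd_eq_one, Int.gcd]
      have h1 : j.natAbs % 2 = 1 := by omega
      have h2 : Int.natAbs 2 = 2 := rfl
      rw [h2, Nat.gcd_comm, Nat.gcd_rec]
      simp [h1]
    have hj2 : j ∣ 2 * (m / 2) := by
      have h3 : (2 : Int) * (m / 2) = m := by omega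
      rw [h3]; exact hjm
    exact hcop.dvd_of_dvd_mul_left hj2
  | case2 m h =>
    rw [pvOddPart, dif_neg h]
    rw [PySem.Int.mod_eq_emod_of_pos (by norm_num : (0:Int) < 2)] at h
    have hodd : m % 2 = 1 := by
      have := Int.emod_two_eq m
      rcases Classical.em (m = 0) with h0 | h0
      · omega
      · tauto
    exact ⟨hm, hodd, dvd_refl m, fun j _ hj => hj⟩

-- A's downward scan, started at or above pvOddPart i, finds exactly pvOddPart i
theorem pvScanA_finds (i : Int) (hi : 0 < i) (a : Int) (ha : pvOddPart i ≤ a) :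
    pvScanA i (PySem.List.pyRange a 0 (-1)) =
      List.replicate (PySem.Int.floordiv i (pvOddPart i)).toNat (pvOddPart i) := by
  obtain ⟨hpos, hodd, hdvd, hmax⟩ := pvOddPart_props i hi
  set m := pvOddPart i with hmdef
  have hcount : (a - m).toNat + m = a := by omega
  generalize hn : (a - m).toNat = n at hcount
  clear hn ha
  induction n generalizing a with
  | zero =>
    have haeq : a = m := by omega
    subst haeq
    rw [PySem.List.pyRange_neg_one_cons (by omega : (0:Int) < m)]
    rw [pvScanA]
    have hcond : PySem.Int.mod m 2 ≠ 0 ∧ m * PySem.Int.floordiv i m = i := by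
      constructor
      · rw [PySem.Int.mod_eq_emod_of_pos (by norm_num : (0:Int) < 2)]; omega
      · have hmul := PySem.Int.floordiv_mul_add_mod i m
        have h0 : PySem.Int.mod i m = 0 := (PySem.Int.mod_eq_zero_iff_dvd i m).mpr hdvd
        linarith
    rw [if_pos hcond]
  | succ n ih =>
    have hlt : m < a := by omega
    rw [PySem.List.pyRange_neg_one_cons (by omega : (0:Int) < a)]
    rw [pvScanA]
    have hcond : ¬ (PySem.Int.mod a 2 ≠ 0 ∧ a * PySem.Int.floordiv i a = i) := by
      rintro ⟨hao, hadv⟩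
      rw [PySem.Int.mod_eq_emod_of_pos (by norm_num : (0:Int) < 2)] at hao
      have hdvd_a : a ∣ i := by
        rw [← PySem.Int.mod_eq_zero_iff_dvd]
        have hmul := PySem.Int.floordiv_mul_add_mod i a
        linarith
      have hda : a ∣ m := hmax a (by omega) hdvd_a
      have := Int.le_of_dvd hpos hda
      omega
    rw [if_neg hcond]
    exact ih (a - 1) (by omega)

theorem pvScanA_finds' (i : Int) (hi : 0 < i) (heven : i % 2 = 0) :
    pvScanA i (PySem.List.pyRange (PySem.Int.floordiv i 2 + 1) 0 (-1)) =
      List.replicate (PySem.Int.floordiv i (pvOddPart i)).toNat (pvOddPart i) := by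
  apply pvScanA_finds i hi
  obtain ⟨hpos, hodd, hdvd, _⟩ := pvOddPart_props i hi
  obtain ⟨k, hk⟩ := hdvd
  have hkeven : k % 2 = 0 := by
    rcases Int.emod_two_eq k with h | h
    · exact h
    · exfalso
      have hio : i % 2 = 1 := by
        obtain ⟨m2, hm2⟩ : ∃ t, pvOddPart i = 2*t+1 := ⟨pvOddPart i / 2, by omega⟩
        obtain ⟨k2, hk2⟩ : ∃ t, k = 2*t+1 := ⟨k / 2, by omega⟩
        rw [hk, hm2, hk2]
        have hh : (2*m2+1) * (2*k2+1) = 2*(2*m2*k2 + m2 + k2) + 1 := by ring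
        rw [hh]; omega
      omega
  have hk0 : 0 < k := by
    rcases (show k < 0 ∨ k = 0 ∨ 0 < k by omega) with h | h | h
    · exfalso; nlinarith
    · exfalso; rw [h, mul_zero] at hk; omega
    · exact h
  have hk2 : 2 ≤ k := by omega
  have hle : pvOddPart i * 2 ≤ i := by nlinarith
  have := (PySem.Int.le_floordiv_iff_mul_le (show (0:Int) < 2 by norm_num)).mpr hle
  omega

-- per-element agreement of the two loop bodies
theorem body_eq (way i : Int) :
    (if PySem.Int.mod i 2 = 0 then
      (if way = 0 then
        (if PySem.Int.mod (PySem.Int.floordiv i 2) 2 ≠ 0 then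
          [PySem.Int.floordiv i 2] ++ [PySem.Int.floordiv i 2]
        else [PySem.Int.floordiv i 2 - 1] ++ [PySem.Int.floordiv i 2 + 1])
      else if way = 1 then [1] ++ [i - 1]
      else if way = 2 then pvScanA i (PySem.List.pyRange (PySem.Int.floordiv i 2 + 1) 0 (-1))
      else List.replicate i.toNat 1)
    else [i]) = pvSplitOne i way := by
  rcases Classical.em (PySem.Int.mod i 2 = 0) with hev | hev
  · rw [if_pos hev, pvSplitOne, if_neg (not_not_intro hev)]
    rcases Classical.em (way = 0) with h0 | h0
    · rw [if_pos h0, if_pos h0]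
      split_ifs <;> rfl
    rw [if_neg h0, if_neg h0]
    rcases Classical.em (way = 1) with h1 | h1
    · rw [if_pos h1, if_pos h1]; rfl
    rw [if_neg h1, if_neg h1]
    rcases Classical.em (way = 2) with h2 | h2
    · rw [if_pos h2, if_pos h2]
      have hev' : i % 2 = 0 := by
        rwa [PySem.Int.mod_eq_emod_of_pos (by norm_num : (0:Int) < 2)] at hev
      rcases (show i ≤ 0 ∨ 0 < i by omega) with hle | hpos
      · rw [if_pos hle]
        rcases Classical.em (i = 0) with h00 | h00
        · subst h00; decide
        · rw [PySem.List.pyRange_neg_one_eq_nil]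
          · rfl
          · rw [PySem.Int.floordiv_eq_ediv_of_pos (by norm_num : (0:Int) < 2)]
            omega
      · rw [if_neg (by omega : ¬ i ≤ 0)]
        exact pvScanA_finds' i hpos hev'
    · rw [if_neg h2, if_neg h2]
  · rw [if_neg hev, pvSplitOne, if_pos hev]

theorem split_eq (numbers : List Int) (way : Int) :
    split_all_even_numbers numbers way = split_all_even_numbers_alt numbers way := by
  unfold split_all_even_numbers split_all_even_numbers_alt
  have halt : numbers.foldl (fun out i => out ++ pvSplitOne i way) [] =
      numbers.flatMap (fun i => pvSplitOne i way) := by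
    simpa using PySem.List.foldl_append_eq_flatMap (fun i => pvSplitOne i way) numbers []
  rcases Classical.em (way = 0) with h0 | h0
  · subst h0
    rw [if_pos rfl, halt]
    rw [show (fun (ans : List Int) (i : Int) =>
        if PySem.Int.mod i 2 = 0 then
          if PySem.Int.mod (PySem.Int.floordiv i 2) 2 ≠ 0 then
            ans ++ [PySem.Int.floordiv i 2] ++ [PySem.Int.floordiv i 2]
          else ans ++ [PySem.Int.floordiv i 2 - 1] ++ [PySem.Int.floordiv i 2 + 1]
        else ans ++ [i]) = fun ans i => ans ++ pvSplitOne i 0 from ?_,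
      PySem.List.foldl_append_eq_flatMap, List.nil_append]
    funext ans i
    have hb := body_eq 0 i
    rw [if_pos rfl] at hb
    split_ifs at hb ⊢ <;> simp_all [List.append_assoc]
  rcases Classical.em (way = 1) with h1 | h1
  · subst h1
    rw [if_neg h0, if_pos rfl, halt]
    rw [show (fun (ans : List Int) (i : Int) =>
        if PySem.Int.mod i 2 = 0 then ans ++ [1] ++ [i - 1] else ans ++ [i]) =
        fun ans i => ans ++ pvSplitOne i 1 from ?_,
      PySem.List.foldl_append_eq_flatMap, List.nil_append]
    funext ans i
    have hb := body_eq 1 i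
    rw [if_neg (by norm_num : ¬ (1:Int) = 0), if_pos rfl] at hb
    split_ifs at hb ⊢ <;> simp_all [List.append_assoc]
  rcases Classical.em (way = 2) with h2 | h2
  · subst h2
    rw [if_neg h0, if_neg h1, if_pos rfl, halt]
    rw [show (fun (ans : List Int) (i : Int) =>
        if PySem.Int.mod i 2 = 0 then
          ans ++ pvScanA i (PySem.List.pyRange (PySem.Int.floordiv i 2 + 1) 0 (-1))
        else ans ++ [i]) = fun ans i => ans ++ pvSplitOne i 2 from ?_,
      PySem.List.foldl_append_eq_flatMap, List.nil_append]
    funext ans i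
    have hb := body_eq 2 i
    rw [if_neg (by norm_num : ¬ (2:Int) = 0), if_neg (by norm_num : ¬ (2:Int) = 1),
      if_pos rfl] at hb
    split_ifs at hb ⊢ <;> simp_all
  · rw [if_neg h0, if_neg h1, if_neg h2, halt]
    rw [show (fun (ans : List Int) (i : Int) =>
        if PySem.Int.mod i 2 = 0 then ans ++ List.replicate i.toNat 1 else ans ++ [i]) =
        fun ans i => ans ++ pvSplitOne i way from ?_,
      PySem.List.foldl_append_eq_flatMap, List.nil_append]
    funext ans i
    have hb := body_eq way i
    rw [if_neg h0, if_neg h1, if_neg h2] at hb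
    split_ifs at hb ⊢ <;> simp_all

-- ===== VERDICT (by name: the statement is the Claim_ definition above) =====
theorem split_all_even_numbers_spec : Claim_equal_split_all_even_numbers := by
  intro numbers way _
  unfold Spec_split_all_even_numbers
  exact split_eq numbers way
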